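-- pv_equiv track=rewrite | github.com/jalenkai/Python-Data-analyze | comm.py | filter2listForRepeat
-- ===== SOURCE A (Python) =====
-- def filter2listForRepeat(chklist1,replist2):
--    items5=[]
--
--    if len(replist2)>0:
--      for keyword_c in chklist1:
--          finds =""
--          for i,x in enumerate(replist2):
--            if (x.find(keyword_c)!=-1):
--               finds = x
--               break;
--
--          if (finds==""):
--            items5.append(keyword_c.strip())
--      if (len(items5)>0):
--            ords_filtered_cut = ','.join(items5)
--            keywords_str_cut = ords_filtered_cut.replace("N'",'').replace("'",'')
--            return str(keywords_str_cut)
--      else: #兩個list全部都相同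
--         ords_filtered_cut = ','.join(chklist1)
--         keywords_str_cut = ords_filtered_cut.replace("N'",'').replace("'",'')
--         return str(keywords_str_cut)
-- ===== SOURCE B (Python) =====
-- def filter2listForRepeat(chklist1, replist2):
--     if not replist2:
--         return None
--     # Prune the keyword list by sweeping replist2 once: each entry removes the
--     # keywords it contains; stop early once nothing survives.
--     survivors = chklist1
--     for x in replist2:
--         if not survivors:
--             break
--         survivors = [k for k in survivors if k not in x]
--     out = [k.strip() for k in survivors] or chklist1
--     return ','.join(out).replace("N'", "").replace("'", "")
-- ===== Notes on version B (the rewrite author's own statement) =====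
-- stated objective: alternative
-- what changed: A scans replist2 afresh for every keyword (inner break-loop with a sentinel string); B inverts the traversal: one outer sweep over replist2 that prunes a surviving-keyword list (early exit when it empties, and matched keywords drop out of all later sweeps), then a single strip/join/replace of the survivors.
-- intended difference: When '' is a keyword and the first entry of replist2 is the empty string, A's empty-string sentinel mistakes that first match for 'no match' and keeps the empty keyword (e.g. returns ',b'), while B drops it ('' is a substring of every string, so the keyword is matched), which is the intended filtering. — e.g. on filter2listForRepeat(["", "b"], ["", "x"]): A returns some ",b", B returns some "b"
import Mathlib
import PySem

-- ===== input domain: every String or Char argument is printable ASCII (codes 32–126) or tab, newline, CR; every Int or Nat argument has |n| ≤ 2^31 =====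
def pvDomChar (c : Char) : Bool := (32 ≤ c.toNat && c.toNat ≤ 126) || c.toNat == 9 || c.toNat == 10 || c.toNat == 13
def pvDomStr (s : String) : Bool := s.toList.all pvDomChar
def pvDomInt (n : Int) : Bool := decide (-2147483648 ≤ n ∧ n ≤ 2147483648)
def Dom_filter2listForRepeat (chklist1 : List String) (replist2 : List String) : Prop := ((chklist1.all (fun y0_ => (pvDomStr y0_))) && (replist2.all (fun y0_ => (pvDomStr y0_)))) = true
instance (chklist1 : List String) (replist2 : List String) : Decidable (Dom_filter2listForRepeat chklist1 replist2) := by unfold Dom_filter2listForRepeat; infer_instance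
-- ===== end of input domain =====

-- B inverts A's traversal: instead of scanning replist2 afresh for each keyword, it makes one
-- outer sweep over replist2 that prunes a surviving-keyword list (early exit when empty),
-- then strips/joins the survivors once (objective: alternative).

-- ===== PORT A =====
-- inner loop 'for i,x in enumerate(replist2): if x.find(keyword_c) != -1: finds = x; break' (finds starts "")
def pvAFinds (k : String) : List String → String
  | [] => ""
  | x :: rest => if PySem.Str.find x k ≠ -1 then x else pvAFinds k rest

def filter2listForRepeat (chklist1 : List String) (replist2 : List String) : Option String :=
  if replist2.length > 0 then
    let items5 := chklist1.foldl
      (fun acc k => if pvAFinds k replist2 = "" then acc ++ [PySem.Str.strip k] else acc) []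
    if items5.length > 0 then
      some (PySem.Str.replace (PySem.Str.replace (PySem.Str.join "," items5) "N'" "") "'" "")
    else
      some (PySem.Str.replace (PySem.Str.replace (PySem.Str.join "," chklist1) "N'" "") "'" "")
  else none

-- ===== PORT B =====
-- 'for x in replist2: if not survivors: break; survivors = [k for k in survivors if k not in x]'
def pvBPrune : List String → List String → List String
  | survivors, [] => survivors
  | survivors, x :: rest =>
      if survivors = [] then survivors
      else pvBPrune (survivors.filter (fun k => !PySem.Str.isIn k x)) rest

def filter2listForRepeat_alt (chklist1 : List String) (replist2 : List String) : Option String :=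
  if replist2 = [] then none
  else
    let stripped := (pvBPrune chklist1 replist2).map PySem.Str.strip
    let out := if stripped = [] then chklist1 else stripped
    some (PySem.Str.replace (PySem.Str.replace (PySem.Str.join "," out) "N'" "") "'" "")

-- ===== PRECONDITION & SPEC =====
-- When '' is a keyword and replist2 starts with '', A's empty-string sentinel mistakes the found
-- entry for 'no match' and keeps the empty keyword (e.g. returns ",b"), while B drops it ('' is a
-- substring of every string, so the keyword is matched), which is the intended filtering.
def D_filter2listForRepeat (chklist1 : List String) (replist2 : List String) : Prop :=
  "" ∈ chklist1 ∧ replist2.head? = some ""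
instance (chklist1 : List String) (replist2 : List String) : Decidable (D_filter2listForRepeat chklist1 replist2) := by unfold D_filter2listForRepeat; infer_instance

def Spec_filter2listForRepeat (chklist1 : List String) (replist2 : List String) (out : Option String) : Prop := ¬ D_filter2listForRepeat chklist1 replist2 → out = filter2listForRepeat_alt chklist1 replist2
instance (chklist1 : List String) (replist2 : List String) (out : Option String) : Decidable (Spec_filter2listForRepeat chklist1 replist2 out) := by unfold Spec_filter2listForRepeat; infer_instance

def pvDiffWitness_filter2listForRepeat : List String × List String := (["", "b"], ["", "x"])
def pvDiffWitnessOut_filter2listForRepeat : (Option String) × (Option String) := (some ",b", some "b")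

-- ===== CLAIM (what is proved, stated in full; the proofs are below) =====
def Claim_unchanged_filter2listForRepeat : Prop := ∀ (chklist1 : List String) (replist2 : List String), Dom_filter2listForRepeat chklist1 replist2 → Spec_filter2listForRepeat chklist1 replist2 (filter2listForRepeat chklist1 replist2)
def Claim_changed_filter2listForRepeat : Prop := Dom_filter2listForRepeat (pvDiffWitness_filter2listForRepeat.1) (pvDiffWitness_filter2listForRepeat.2) ∧ D_filter2listForRepeat (pvDiffWitness_filter2listForRepeat.1) (pvDiffWitness_filter2listForRepeat.2) ∧ filter2listForRepeat (pvDiffWitness_filter2listForRepeat.1) (pvDiffWitness_filter2listForRepeat.2) = pvDiffWitnessOut_filter2listForRepeat.1 ∧ filter2listForRepeat_alt (pvDiffWitness_filter2listForRepeat.1) (pvDiffWitness_filter2listForRepeat.2) = pvDiffWitnessOut_filter2listForRepeat.2 ∧ pvDiffWitnessOut_filter2listForRepeat.1 ≠ pvDiffWitnessOut_filter2listForRepeat.2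

-- ===== LEMMAS AND PROOFS =====

-- B's pruning sweep is the filter by 'no entry contains k' (early exit included)
theorem pvBPrune_eq_filter (l : List String) (s : List String) :
    pvBPrune s l = s.filter (fun k => l.all (fun x => !PySem.Str.isIn k x)) := by
  induction l generalizing s with
  | nil => simp [pvBPrune]
  | cons x t ih =>
    rw [pvBPrune]
    by_cases hs : s = []
    · simp [hs]
    · rw [if_neg hs, ih, List.filter_filter]
      exact List.filter_congr (fun a _ => by simp [List.all_cons, Bool.and_comm])

-- A's inner loop leaves the sentinel "" exactly when no entry contains k (k non-empty)
theorem pvFinds_empty_iff (k : String) (hk : k ≠ "") (l : List String) :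
    pvAFinds k l = "" ↔ l.all (fun x => !PySem.Str.isIn k x) = true := by
  induction l with
  | nil => simp [pvAFinds]
  | cons x t ih =>
    rw [pvAFinds]
    by_cases hf : PySem.Str.find x k = -1
    · have hin : PySem.Str.isIn k x = false := by
        rw [Bool.eq_false_iff, Ne, PySem.Str.isIn_iff_infix]
        exact (PySem.Str.find_eq_neg_one_iff x k).mp hf
      rw [if_neg (by simpa using hf), ih]
      simp only [List.all_cons, hin, Bool.not_false, Bool.true_and]
    · have hinf : k.toList <:+: x.toList := (PySem.Str.find_ne_neg_one_iff x k).mp hf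
      have hx : x ≠ "" := by
        intro hx0
        apply hk
        rw [← String.toList_eq_nil_iff]
        exact List.eq_nil_of_infix_nil ((String.toList_eq_nil_iff.mpr hx0) ▸ hinf)
      have hin : PySem.Str.isIn k x = true := (PySem.Str.isIn_iff_infix k x).mpr hinf
      rw [if_pos hf]
      refine iff_of_false hx ?_
      simp only [List.all_cons, hin, Bool.not_true, Bool.false_and]
      simp

theorem filter2listForRepeat_spec_aux (chk : List String) (r : String) (rs : List String)
    (hr : "" ∈ chk → r ≠ "") :
    filter2listForRepeat chk (r :: rs) = filter2listForRepeat_alt chk (r :: rs) := by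
  have hfold := PySem.List.foldl_append_if
      (fun k => decide (pvAFinds k (r :: rs) = "")) PySem.Str.strip chk ([] : List String)
  simp only [decide_eq_true_eq, List.nil_append] at hfold
  have hpt : ∀ k ∈ chk,
      (decide (pvAFinds k (r :: rs) = ""))
        = ((r :: rs).all (fun x => !PySem.Str.isIn k x)) := by
    intro k hkmem
    by_cases hke : k = ""
    · subst hke
      have hrne : r ≠ "" := hr hkmem
      have hfind : PySem.Str.find r "" ≠ -1 := by
        rw [PySem.Str.find_ne_neg_one_iff]
        simp
      have hA : pvAFinds "" (r :: rs) = r := by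
        rw [pvAFinds, if_pos hfind]
      have hin : PySem.Str.isIn "" r = true := by
        rw [PySem.Str.isIn_iff_infix]; simp
      rw [hA, decide_eq_false hrne]
      simp only [List.all_cons, hin, Bool.not_true, Bool.false_and]
    · have hiff := pvFinds_empty_iff k hke (r :: rs)
      by_cases hb : (r :: rs).all (fun x => !PySem.Str.isIn k x) = true
      · exact (decide_eq_true (hiff.mpr hb)).trans hb.symm
      · have hnf : ¬ pvAFinds k (r :: rs) = "" := fun h => hb (hiff.mp h)
        exact (decide_eq_false hnf).trans (Bool.eq_false_iff.mpr hb).symm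
  have hfilter := List.filter_congr hpt
  simp only [filter2listForRepeat, filter2listForRepeat_alt, List.length_cons,
    if_pos (by omega : 0 < rs.length + 1),
    if_neg (by simp : ¬ (r :: rs : List String) = [])]
  rw [hfold, hfilter, pvBPrune_eq_filter]
  set kept := (chk.filter (fun k =>
      (r :: rs).all (fun x => !PySem.Str.isIn k x))).map PySem.Str.strip with hkept
  by_cases hk : kept = []
  · simp [hk]
  · have : 0 < kept.length := List.length_pos_iff.mpr hk
    simp [hk, this]

-- ===== VERDICT (by name: the statement is the Claim_ definition above) =====
theorem filter2listForRepeat_spec : Claim_unchanged_filter2listForRepeat := by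
  intro chk rep _hDom hND
  show filter2listForRepeat chk rep = filter2listForRepeat_alt chk rep
  unfold D_filter2listForRepeat at hND
  cases rep with
  | nil => rfl
  | cons r rs =>
    exact filter2listForRepeat_spec_aux chk r rs
      (fun hmem hr0 => hND ⟨hmem, by simp [hr0]⟩)

theorem filter2listForRepeat_changed : Claim_changed_filter2listForRepeat := by
  unfold Claim_changed_filter2listForRepeat; decide
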